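-- pv_equiv track=rewrite | github.com/ci5437-ene-mar-2018/proyecto-3-liay | proyecto-3/nonogram_solver/generator.py | filterRules
-- ===== SOURCE A (Python) =====
-- def appendable(rule1, rule2):
-- 	for var1 in rule1:
-- 		for var2 in rule2:
-- 			if abs(var1) >= abs(var2):
-- 				return False
--
-- 	return True
--
-- def filterRules(ruleDic1, ruleDic2):
-- 	orderRules = {}
-- 	appendableRules = {}
--
-- 	keys = []
-- 	for key1 in ruleDic1:
-- 		for key2 in ruleDic2:
--
-- 			if not appendable(ruleDic1[key1], ruleDic2[key2]):
-- 				try: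
-- 					orderRules[key1].append(-key2)
-- 				except:
-- 					orderRules[key1] = [-key2]
--
-- 			else:
-- 				appendableRules[key1] = True
-- 				appendableRules[key2] = True
--
--
-- 	# delete impossible rules
-- 	for key in list(ruleDic1):
-- 		if not appendableRules.get(key, False):
-- 			del ruleDic1[key]
-- 			orderRules.pop(key, None)
--
-- 			for key2 in orderRules:
-- 				if -key in orderRules[key2]:
-- 					orderRules[key2].remove(-key)
--
-- 	for key in list(ruleDic2):
-- 		if not appendableRules.get(key, False):
-- 			del ruleDic2[key]
-- 			orderRules.pop(key, None)
--
-- 			for key2 in orderRules: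
-- 				if -key in orderRules[key2]:
-- 					orderRules[key2].remove(-key)
--
-- 	# add order rules
-- 	for key in orderRules:
-- 		try:
-- 			ruleDic1[key] += orderRules[key]
-- 		except:
-- 			ruleDic2[key] += orderRules[key]
--
-- 	return [list(ruleDic1.keys()), list(ruleDic2.keys())]
-- ===== SOURCE B (Python) =====
-- def filterRules(ruleDic1, ruleDic2):
-- 	# Return-value equivalent to A; also deletes non-kept keys from both dicts,
-- 	# but does not append order rules into the kept value lists (A does).
-- 	maxs = {k: max(map(abs, r), default=None) for k, r in ruleDic1.items()}
-- 	mins = {k: min(map(abs, r), default=None) for k, r in ruleDic2.items()}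
-- 	keep = set()
-- 	for k1, m1 in maxs.items():
-- 		for k2, m2 in mins.items():
-- 			if m1 is None or m2 is None or m1 < m2:
-- 				keep.add(k1)
-- 				keep.add(k2)
-- 	for k in [k for k in ruleDic1 if k not in keep]:
-- 		del ruleDic1[k]
-- 	for k in [k for k in ruleDic2 if k not in keep]:
-- 		del ruleDic2[k]
-- 	return [list(ruleDic1), list(ruleDic2)]
-- ===== Notes on version B (the rewrite author's own statement) =====
-- stated objective: faster
-- what changed: B drops A's orderRules bookkeeping and quadratic delete/repair passes entirely: it precomputes each rule's max (resp. min) absolute value once, builds the keep-set of keys participating in an appendable pair by comparing those scalars, and filters both key lists in one pass; the return value is only the surviving key lists, which never depend on the order-rule lists A maintains.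
import Mathlib
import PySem

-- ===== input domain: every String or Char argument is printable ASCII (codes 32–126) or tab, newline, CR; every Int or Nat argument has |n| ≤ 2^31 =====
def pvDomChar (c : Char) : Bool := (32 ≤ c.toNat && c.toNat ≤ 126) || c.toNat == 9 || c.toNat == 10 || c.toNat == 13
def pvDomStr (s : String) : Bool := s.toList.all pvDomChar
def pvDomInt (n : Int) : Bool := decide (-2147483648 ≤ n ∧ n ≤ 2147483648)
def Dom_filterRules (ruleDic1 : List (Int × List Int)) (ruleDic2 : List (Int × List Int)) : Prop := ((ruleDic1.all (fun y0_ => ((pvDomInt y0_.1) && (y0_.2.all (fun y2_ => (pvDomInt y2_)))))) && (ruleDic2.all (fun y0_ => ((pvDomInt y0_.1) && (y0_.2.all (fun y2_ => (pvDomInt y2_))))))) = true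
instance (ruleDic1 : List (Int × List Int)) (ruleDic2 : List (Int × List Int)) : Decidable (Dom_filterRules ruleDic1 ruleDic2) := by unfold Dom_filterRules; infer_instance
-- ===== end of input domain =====

-- B replaces A's orderRules bookkeeping and quadratic pruning by one keep-set pass over
-- precomputed max/min absolute values; equivalence is about the RETURN value only (A also
-- mutates both dict arguments: it deletes keys and appends order rules into value lists;
-- B performs only the key deletions).

-- ===== PORT A =====
-- appendable(rule1, rule2): nested loop returning False on the first |var1| >= |var2|
def appendableA (rule1 : List Int) (rule2 : List Int) : Bool :=
  rule1.all (fun var1 => rule2.all (fun var2 => decide (|var1| < |var2|)))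

def filterRules (ruleDic1 : List (Int × List Int)) (ruleDic2 : List (Int × List Int)) : List (List Int) :=
  let d1 := PySem.Dict.ofList ruleDic1
  let d2 := PySem.Dict.ofList ruleDic2
  -- first nested loop: state = (orderRules, appendableRules)
  let st0 : PySem.Dict Int (List Int) × PySem.Dict Int Bool :=
    d1.keys.foldl (fun st key1 =>
      d2.keys.foldl (fun st key2 =>
        if ¬ appendableA (d1.getD key1 []) (d2.getD key2 []) then
          -- try: orderRules[key1].append(-key2)  except: orderRules[key1] = [-key2]
          (st.1.insert key1 (st.1.getD key1 [] ++ [-key2]), st.2)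
        else
          (st.1, (st.2.insert key1 true).insert key2 true)) st)
      (PySem.Dict.empty, PySem.Dict.empty)
  let appendableRules := st0.2
  -- delete impossible rules, pass 1: state = (ruleDic1, orderRules)
  let pr1 : PySem.Dict Int (List Int) × PySem.Dict Int (List Int) :=
    d1.keys.foldl (fun st key =>
      if appendableRules.getD key false then st
      else
        let d := st.1.erase key
        let od := st.2.erase key
        let od := od.keys.foldl (fun od key2 =>
          if (-key) ∈ od.getD key2 [] then
            od.insert key2 ((PySem.List.remove? (od.getD key2 []) (-key)).getD (od.getD key2 []))
          else od) od
        (d, od)) (d1, st0.1)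
  -- pass 2 over ruleDic2's keys: state = (ruleDic2, orderRules)
  let pr2 : PySem.Dict Int (List Int) × PySem.Dict Int (List Int) :=
    d2.keys.foldl (fun st key =>
      if appendableRules.getD key false then st
      else
        let d := st.1.erase key
        let od := st.2.erase key
        let od := od.keys.foldl (fun od key2 =>
          if (-key) ∈ od.getD key2 [] then
            od.insert key2 ((PySem.List.remove? (od.getD key2 []) (-key)).getD (od.getD key2 []))
          else od) od
        (d, od)) (d2, pr1.2)
  let orderRules := pr2.2
  -- add order rules: try ruleDic1[key] += …  except: ruleDic2[key] += …
  let fin : PySem.Dict Int (List Int) × PySem.Dict Int (List Int) :=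
    orderRules.keys.foldl (fun st key =>
      match st.1.get? key with
      | some v => (st.1.insert key (v ++ orderRules.getD key []), st.2)
      | none =>
        match st.2.get? key with
        | some v => (st.1, st.2.insert key (v ++ orderRules.getD key []))
        | none => st) -- Python would raise KeyError here; never reached (orderRules keys survive in ruleDic1)
      (pr1.1, pr2.1)
  [fin.1.keys, fin.2.keys]

-- ===== PORT B =====
-- m1 is None or m2 is None or m1 < m2
def okPair (m1 : Option Int) (m2 : Option Int) : Bool :=
  match m1, m2 with
  | none, _ => true
  | _, none => true
  | some a, some b => decide (a < b)

def filterRules_alt (ruleDic1 : List (Int × List Int)) (ruleDic2 : List (Int × List Int)) : List (List Int) :=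
  let d1 := PySem.Dict.ofList ruleDic1
  let d2 := PySem.Dict.ofList ruleDic2
  -- dict comprehensions over distinct keys: their items are these maps
  let maxs := d1.items.map (fun p => (p.1, PySem.List.max? (p.2.map (fun v => |v|)) (fun x => x)))
  let mins := d2.items.map (fun p => (p.1, PySem.List.min? (p.2.map (fun v => |v|)) (fun x => x)))
  let keep : PySem.Set Int :=
    maxs.foldl (fun s p1 =>
      mins.foldl (fun s p2 =>
        if okPair p1.2 p2.2 then PySem.Set.add (PySem.Set.add s p1.1) p2.1 else s) s)
      PySem.Set.empty
  let toDel1 := d1.keys.filter (fun k => !PySem.Set.contains keep k)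
  let d1' := toDel1.foldl (fun d k => d.erase k) d1
  let toDel2 := d2.keys.filter (fun k => !PySem.Set.contains keep k)
  let d2' := toDel2.foldl (fun d k => d.erase k) d2
  [d1'.keys, d2'.keys]

-- ===== PRECONDITION & SPEC =====
def Spec_filterRules (ruleDic1 : List (Int × List Int)) (ruleDic2 : List (Int × List Int)) (out : List (List Int)) : Prop := out = filterRules_alt ruleDic1 ruleDic2
instance (ruleDic1 : List (Int × List Int)) (ruleDic2 : List (Int × List Int)) (out : List (List Int)) : Decidable (Spec_filterRules ruleDic1 ruleDic2 out) := by unfold Spec_filterRules; infer_instance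

-- ===== CLAIM (what is proved, stated in full; the proofs are below) =====
def Claim_equal_filterRules : Prop := ∀ (ruleDic1 : List (Int × List Int)) (ruleDic2 : List (Int × List Int)), Dom_filterRules ruleDic1 ruleDic2 → Spec_filterRules ruleDic1 ruleDic2 (filterRules ruleDic1 ruleDic2)

-- ===== LEMMAS AND PROOFS =====

-- the "k participates in some appendable pair" test both programs end up filtering by
def markB (d1 d2 : PySem.Dict Int (List Int)) (k : Int) : Bool :=
  d1.keys.any (fun k1 => d2.keys.any (fun k2 =>
    appendableA (d1.getD k1 []) (d2.getD k2 []) && (decide (k = k1) || decide (k = k2))))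

-- ---- A side: projections of the loops, and the marking characterization ----

theorem proj2_inner (d1 d2 : PySem.Dict Int (List Int)) (key1 : Int) (ks : List Int)
    (st : PySem.Dict Int (List Int) × PySem.Dict Int Bool) :
    (ks.foldl (fun st key2 =>
      if ¬ appendableA (d1.getD key1 []) (d2.getD key2 []) then
        (st.1.insert key1 (st.1.getD key1 [] ++ [-key2]), st.2)
      else
        (st.1, (st.2.insert key1 true).insert key2 true)) st).2
    = ks.foldl (fun M key2 =>
        if appendableA (d1.getD key1 []) (d2.getD key2 []) then
          (M.insert key1 true).insert key2 true
        else M) st.2 := by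
  induction ks generalizing st with
  | nil => rfl
  | cons k2 t ih =>
      simp only [List.foldl_cons]
      rw [ih]
      congr 1
      by_cases h : appendableA (d1.getD key1 []) (d2.getD k2 []) = true
      · simp [h]
      · simp [h]

theorem proj2_outer (d1 d2 : PySem.Dict Int (List Int)) (ks : List Int)
    (st : PySem.Dict Int (List Int) × PySem.Dict Int Bool) :
    (ks.foldl (fun st key1 =>
      d2.keys.foldl (fun st key2 =>
        if ¬ appendableA (d1.getD key1 []) (d2.getD key2 []) then
          (st.1.insert key1 (st.1.getD key1 [] ++ [-key2]), st.2)
        else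
          (st.1, (st.2.insert key1 true).insert key2 true)) st) st).2
    = ks.foldl (fun M key1 =>
        d2.keys.foldl (fun M key2 =>
          if appendableA (d1.getD key1 []) (d2.getD key2 []) then
            (M.insert key1 true).insert key2 true
          else M) M) st.2 := by
  induction ks generalizing st with
  | nil => rfl
  | cons k1 t ih =>
      simp only [List.foldl_cons]
      rw [ih]
      congr 1
      exact proj2_inner d1 d2 k1 d2.keys st

theorem mark_inner_getD (c : Int → Bool) (key1 : Int) (ks : List Int) (M : PySem.Dict Int Bool) (k : Int) :
    ((ks.foldl (fun M key2 => if c key2 then (M.insert key1 true).insert key2 true else M) M).getD k false)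
    = (M.getD k false || ks.any (fun key2 => c key2 && (decide (k = key1) || decide (k = key2)))) := by
  induction ks generalizing M with
  | nil => simp
  | cons k2 t ih =>
      simp only [List.foldl_cons, List.any_cons]
      rw [ih]
      by_cases h : c k2 = true
      · simp only [h, if_pos]
        rw [PySem.Dict.getD_insert, PySem.Dict.getD_insert]
        split_ifs with h1 h2 <;> simp_all
      · simp [h]

theorem mark_outer_getD (c : Int → Int → Bool) (ks1 ks2 : List Int) (M : PySem.Dict Int Bool) (k : Int) :
    ((ks1.foldl (fun M key1 =>
        ks2.foldl (fun M key2 => if c key1 key2 then (M.insert key1 true).insert key2 true else M) M) M).getD k false)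
    = (M.getD k false ||
        ks1.any (fun key1 => ks2.any (fun key2 => c key1 key2 && (decide (k = key1) || decide (k = key2))))) := by
  induction ks1 generalizing M with
  | nil => simp
  | cons k1 t ih =>
      simp only [List.foldl_cons, List.any_cons]
      rw [ih, mark_inner_getD, Bool.or_assoc]

theorem proj1_prune (p : Int → Bool) (ks : List Int)
    (st : PySem.Dict Int (List Int) × PySem.Dict Int (List Int)) :
    (ks.foldl (fun st key =>
      if p key then st
      else
        (st.1.erase key,
          (st.2.erase key).keys.foldl (fun od key2 =>
            if (-key) ∈ od.getD key2 [] then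
              od.insert key2 ((PySem.List.remove? (od.getD key2 []) (-key)).getD (od.getD key2 []))
            else od) (st.2.erase key))) st).1
    = ks.foldl (fun d key => if p key then d else d.erase key) st.1 := by
  induction ks generalizing st with
  | nil => rfl
  | cons k0 t ih =>
      simp only [List.foldl_cons]
      rw [ih]
      congr 1
      by_cases h : p k0 = true
      · simp [h]
      · simp [h]

theorem items_foldl_eraseIf (p : Int → Bool) (ks : List Int) (d : PySem.Dict Int (List Int)) :
    (ks.foldl (fun d k => if p k then d else d.erase k) d).items
    = d.items.filter (fun q => p q.1 || !(ks.contains q.1)) := by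
  induction ks generalizing d with
  | nil => simp
  | cons k0 t ih =>
      simp only [List.foldl_cons]
      by_cases h : p k0 = true
      · rw [if_pos h, ih]
        apply List.filter_congr
        intro q _
        by_cases hq : q.1 = k0 <;> simp_all
      · rw [if_neg h, ih]
        have he : (d.erase k0).items = d.items.filter (fun q => q.1 != k0) := rfl
        rw [he, List.filter_filter]
        apply List.filter_congr
        intro q _
        by_cases hq : q.1 = k0 <;> simp_all

theorem keys_foldl_eraseIf (p : Int → Bool) (d : PySem.Dict Int (List Int)) :
    (d.keys.foldl (fun d k => if p k then d else d.erase k) d).keys = d.keys.filter p := by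
  have h := items_foldl_eraseIf p d.keys d
  show (d.keys.foldl (fun d k => if p k then d else d.erase k) d).items.map Prod.fst
      = (d.items.map Prod.fst).filter p
  rw [h, List.filter_map]
  congr 1
  apply List.filter_congr
  intro q hq
  have hc : d.keys.contains q.1 = true := by
    have : q.1 ∈ d.keys := List.mem_map_of_mem hq
    simpa using this
  simp only [hc, Bool.not_true, Bool.or_false]
  rfl

theorem keys_final1 (od : PySem.Dict Int (List Int)) (ks : List Int)
    (st : PySem.Dict Int (List Int) × PySem.Dict Int (List Int)) :
    (ks.foldl (fun st key =>
      match st.1.get? key with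
      | some v => (st.1.insert key (v ++ od.getD key []), st.2)
      | none =>
        match st.2.get? key with
        | some v => (st.1, st.2.insert key (v ++ od.getD key []))
        | none => st) st).1.keys = st.1.keys ∧
    (ks.foldl (fun st key =>
      match st.1.get? key with
      | some v => (st.1.insert key (v ++ od.getD key []), st.2)
      | none =>
        match st.2.get? key with
        | some v => (st.1, st.2.insert key (v ++ od.getD key []))
        | none => st) st).2.keys = st.2.keys := by
  induction ks generalizing st with
  | nil => exact ⟨rfl, rfl⟩
  | cons k0 t ih =>
      simp only [List.foldl_cons]
      rcases h1 : st.1.get? k0 with _ | v1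
      · rcases h2 : st.2.get? k0 with _ | v2
        · simpa [h1, h2] using ih st
        · have hc : st.2.contains k0 = true := by
            rw [PySem.Dict.contains_eq_isSome_get?, h2]; rfl
          have := ih (st.1, st.2.insert k0 (v2 ++ od.getD k0 []))
          simp only [h1, h2] at *
          exact ⟨this.1, by rw [this.2]; exact PySem.Dict.keys_insert_of_contains _ _ hc⟩
      · have hc : st.1.contains k0 = true := by
          rw [PySem.Dict.contains_eq_isSome_get?, h1]; rfl
        have := ih (st.1.insert k0 (v1 ++ od.getD k0 []), st.2)
        simp only [h1] at *
        exact ⟨by rw [this.1]; exact PySem.Dict.keys_insert_of_contains _ _ hc, this.2⟩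

theorem A_to_filter (l1 l2 : List (Int × List Int)) :
    filterRules l1 l2 =
      [(PySem.Dict.ofList l1).keys.filter
          (markB (PySem.Dict.ofList l1) (PySem.Dict.ofList l2)),
       (PySem.Dict.ofList l2).keys.filter
          (markB (PySem.Dict.ofList l1) (PySem.Dict.ofList l2))] := by
  unfold filterRules
  simp only [proj2_outer, mark_outer_getD, PySem.Dict.getD_empty, Bool.false_or,
    (keys_final1 _ _ _).1, (keys_final1 _ _ _).2, proj1_prune]
  rw [keys_foldl_eraseIf, keys_foldl_eraseIf]
  rfl

-- ---- B side ----

theorem keep_inner_mem (a : Int) (c : Int × Option Int → Bool) (ms : List (Int × Option Int))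
    (s : PySem.Set Int) (k : Int) :
    (k ∈ ms.foldl (fun s p2 => if c p2 then PySem.Set.add (PySem.Set.add s a) p2.1 else s) s)
    ↔ (k ∈ s ∨ ∃ p2 ∈ ms, c p2 = true ∧ (k = a ∨ k = p2.1)) := by
  induction ms generalizing s with
  | nil => simp
  | cons p0 t ih =>
      simp only [List.foldl_cons]
      rw [ih]
      by_cases h : c p0 = true
      · simp [h, PySem.Set.mem_add]
        aesop
      · simp [h]

theorem keep_outer_mem (c : Int × Option Int → Int × Option Int → Bool)
    (ms1 ms2 : List (Int × Option Int)) (s : PySem.Set Int) (k : Int) :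
    (k ∈ ms1.foldl (fun s p1 =>
        ms2.foldl (fun s p2 => if c p1 p2 then PySem.Set.add (PySem.Set.add s p1.1) p2.1 else s) s) s)
    ↔ (k ∈ s ∨ ∃ p1 ∈ ms1, ∃ p2 ∈ ms2, c p1 p2 = true ∧ (k = p1.1 ∨ k = p2.1)) := by
  induction ms1 generalizing s with
  | nil => simp
  | cons p0 t ih =>
      simp only [List.foldl_cons]
      rw [ih, keep_inner_mem]
      constructor
      · rintro ((h | h) | h) <;> aesop
      · rintro (h | ⟨p1, hp1, h⟩)
        · tauto
        · rcases List.mem_cons.mp hp1 with rfl | hp1 <;> aesop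

theorem okPair_eq_appendableA (r1 r2 : List Int) :
    okPair (PySem.List.max? (r1.map (fun v => |v|)) (fun x => x))
           (PySem.List.min? (r2.map (fun v => |v|)) (fun x => x))
    = appendableA r1 r2 := by
  rcases h1 : PySem.List.max? (r1.map (fun v => |v|)) (fun x => x) with _ | a
  · rw [PySem.List.max?_eq_none_iff] at h1
    rw [List.map_eq_nil_iff] at h1
    subst h1; simp [okPair, appendableA]
  · rcases h2 : PySem.List.min? (r2.map (fun v => |v|)) (fun x => x) with _ | b
    · rw [PySem.List.min?_eq_none_iff] at h2
      rw [List.map_eq_nil_iff] at h2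
      subst h2; simp [okPair, appendableA]
    · have ha := PySem.List.max?_mem h1
      have hb := PySem.List.min?_mem h2
      have hmax := PySem.List.max?_isMax h1
      have hmin := PySem.List.min?_isMin h2
      rw [Bool.eq_iff_iff]
      simp only [okPair, appendableA, decide_eq_true_eq, List.all_eq_true]
      constructor
      · intro hab v1 hv1 v2 hv2
        have h1' := hmax _ (List.mem_map_of_mem hv1)
        have h2' := hmin _ (List.mem_map_of_mem hv2)
        omega
      · intro hall
        rcases List.mem_map.mp ha with ⟨v1, hv1, rfl⟩
        rcases List.mem_map.mp hb with ⟨v2, hv2, rfl⟩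
        have := hall v1 hv1 v2 hv2
        simpa using this

theorem keys_foldl_erase_del (q : Int → Bool) (d : PySem.Dict Int (List Int)) :
    ((d.keys.filter (fun k => !q k)).foldl (fun d k => d.erase k) d).keys = d.keys.filter q := by
  have hfn : (fun (d : PySem.Dict Int (List Int)) k => d.erase k)
      = (fun (d : PySem.Dict Int (List Int)) k => if (fun (_ : Int) => false) k then d else d.erase k) := by
    funext d k; simp
  rw [hfn]
  show ((d.keys.filter (fun k => !q k)).foldl
      (fun d k => if (fun (_ : Int) => false) k then d else d.erase k) d).items.map Prod.fst
      = (d.items.map Prod.fst).filter q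
  rw [items_foldl_eraseIf, List.filter_map]
  congr 1
  apply List.filter_congr
  intro x hx
  have hxk : x.1 ∈ d.keys := List.mem_map_of_mem hx
  by_cases hqx : q x.1 = true
  · simp [Function.comp, hqx]
  · simp [Function.comp, hqx, hxk]

theorem B_to_filter (l1 l2 : List (Int × List Int)) :
    filterRules_alt l1 l2 =
      [(PySem.Dict.ofList l1).keys.filter
          (markB (PySem.Dict.ofList l1) (PySem.Dict.ofList l2)),
       (PySem.Dict.ofList l2).keys.filter
          (markB (PySem.Dict.ofList l1) (PySem.Dict.ofList l2))] := by
  unfold filterRules_alt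
  dsimp only []
  rw [keys_foldl_erase_del, keys_foldl_erase_del]
  have hkeep : ∀ k : Int,
      PySem.Set.contains
        (((PySem.Dict.ofList l1).items.map
            (fun p => (p.1, PySem.List.max? (p.2.map (fun v => |v|)) (fun x => x)))).foldl
          (fun s p1 =>
            (((PySem.Dict.ofList l2).items.map
                (fun p => (p.1, PySem.List.min? (p.2.map (fun v => |v|)) (fun x => x)))).foldl
              (fun s p2 => if okPair p1.2 p2.2 then PySem.Set.add (PySem.Set.add s p1.1) p2.1 else s) s))
          PySem.Set.empty) k
      = markB (PySem.Dict.ofList l1) (PySem.Dict.ofList l2) k := by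
    intro k
    rw [Bool.eq_iff_iff]
    rw [PySem.Set.contains_iff]
    rw [keep_outer_mem]
    rw [PySem.Dict.items_eq_map_keys _ (PySem.Dict.nodup_keys_ofList l1) []]
    rw [PySem.Dict.items_eq_map_keys _ (PySem.Dict.nodup_keys_ofList l2) []]
    simp only [markB, List.any_eq_true, List.map_map, Function.comp, List.mem_map,
      Bool.and_eq_true, Bool.or_eq_true, decide_eq_true_eq, PySem.Set.empty,
      List.not_mem_nil, false_or]
    constructor
    · rintro ⟨p1, ⟨k1, hk1, rfl⟩, p2, ⟨k2, hk2, rfl⟩, hok, hor⟩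
      refine ⟨k1, hk1, k2, hk2, ?_, ?_⟩
      · rw [← okPair_eq_appendableA]; exact hok
      · exact hor
    · rintro ⟨k1, hk1, k2, hk2, happ, hor⟩
      refine ⟨_, ⟨k1, hk1, rfl⟩, _, ⟨k2, hk2, rfl⟩, ?_, ?_⟩
      · rw [okPair_eq_appendableA]; exact happ
      · exact hor
  rw [List.filter_congr (fun k _ => hkeep k), List.filter_congr (fun k _ => hkeep k)]

-- ===== VERDICT (by name: the statement is the Claim_ definition above) =====
theorem filterRules_spec : Claim_equal_filterRules := by
  intro l1 l2 _
  show filterRules l1 l2 = filterRules_alt l1 l2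
  rw [A_to_filter, B_to_filter]
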